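-- pv_equiv track=rewrite | github.com/perekatypole/tasks_py | lessons1-4/5.91.py | count_odd_and_even_divisors
-- ===== SOURCE A (Python) =====
-- def get_divisors(n):
--     return [x for x in range(1, n+1) if n % x == 0]
--
-- def count_odd_and_even_divisors(n):
--     odd = 0
--     even = 0
--     for d in get_divisors(n):
--         if d % 2 == 0:
--             even += 1
--         else:
--             odd += 1
--     return odd, even
-- ===== SOURCE B (Python) =====
-- def count_odd_and_even_divisors(n):
--     odd = 0
--     even = 0
--     i = 1
--     while i * i <= n:
--         if n % i == 0:
--             if i % 2 == 0:
--                 even += 1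
--             else:
--                 odd += 1
--             j = n // i
--             if j != i:
--                 if j % 2 == 0:
--                     even += 1
--                 else:
--                     odd += 1
--         i += 1
--     return odd, even
-- ===== Notes on version B (the rewrite author's own statement) =====
-- stated objective: faster
-- what changed: Instead of scanning all candidates 1..n and filtering divisors, B iterates i only up to sqrt(n) and counts each divisor pair (i, n//i) by parity.
import Mathlib
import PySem

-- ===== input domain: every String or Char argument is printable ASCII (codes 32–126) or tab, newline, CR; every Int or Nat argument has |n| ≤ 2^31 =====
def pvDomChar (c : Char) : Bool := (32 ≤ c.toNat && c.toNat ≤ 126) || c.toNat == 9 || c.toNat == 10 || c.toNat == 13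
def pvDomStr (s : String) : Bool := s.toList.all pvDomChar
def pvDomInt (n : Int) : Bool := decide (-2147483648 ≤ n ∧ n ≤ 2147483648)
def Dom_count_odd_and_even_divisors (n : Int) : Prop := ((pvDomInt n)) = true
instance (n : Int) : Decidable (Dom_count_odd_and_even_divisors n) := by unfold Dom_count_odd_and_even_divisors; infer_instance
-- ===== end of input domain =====

-- B replaces A's full scan of 1..n by a loop to sqrt(n) counting each divisor pair (i, n//i) by parity: asymptotically faster.


-- termination helper for the B-side loop (cited by decreasing_by)
theorem pvSqLoopMeasure {n i : Int} (h : i * i ≤ n) :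
    (n + 1 - (i + 1)).toNat < (n + 1 - i).toNat := by
  by_cases hi : i ≤ 0
  · have : (0:Int) ≤ i * i := mul_self_nonneg i
    omega
  · have : i ≤ i * i := le_mul_of_one_le_left (by omega) (by omega)
    omega

-- ===== PORT A =====
def get_divisors (n : Int) : List Int :=
  (PySem.List.pyRange 1 (n + 1) 1).filter (fun x => decide (PySem.Int.mod n x = 0))

def count_odd_and_even_divisors (n : Int) : Int × Int :=
  (get_divisors n).foldl
    (fun s d => if PySem.Int.mod d 2 = 0 then (s.1, s.2 + 1) else (s.1 + 1, s.2))
    (0, 0)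

-- ===== PORT B =====
def countLoopB (n i odd even : Int) : Int × Int :=
  if h : i * i ≤ n then
    if PySem.Int.mod n i = 0 then
      let odd1 := if PySem.Int.mod i 2 = 0 then odd else odd + 1
      let even1 := if PySem.Int.mod i 2 = 0 then even + 1 else even
      let j := PySem.Int.floordiv n i
      if j ≠ i then
        let odd2 := if PySem.Int.mod j 2 = 0 then odd1 else odd1 + 1
        let even2 := if PySem.Int.mod j 2 = 0 then even1 + 1 else even1
        countLoopB n (i + 1) odd2 even2
      else countLoopB n (i + 1) odd1 even1
    else countLoopB n (i + 1) odd even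
  else (odd, even)
termination_by (n + 1 - i).toNat
decreasing_by all_goals exact pvSqLoopMeasure h

def count_odd_and_even_divisors_alt (n : Int) : Int × Int :=
  countLoopB n 1 0 0

-- ===== PRECONDITION & SPEC =====
def Spec_count_odd_and_even_divisors (n : Int) (out : Int × Int) : Prop := out = count_odd_and_even_divisors_alt n
instance (n : Int) (out : Int × Int) : Decidable (Spec_count_odd_and_even_divisors n out) := by unfold Spec_count_odd_and_even_divisors; infer_instance

-- ===== CLAIM (what is proved, stated in full; the proofs are below) =====
def Claim_equal_count_odd_and_even_divisors : Prop := ∀ (n : Int), Dom_count_odd_and_even_divisors n → Spec_count_odd_and_even_divisors n (count_odd_and_even_divisors n)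

-- ===== LEMMAS AND PROOFS =====

-- the multiset of divisors B's loop visits from i upwards
def divListB (n i : Int) : List Int :=
  if h : i * i ≤ n then
    if PySem.Int.mod n i = 0 then
      let j := PySem.Int.floordiv n i
      if j ≠ i then i :: j :: divListB n (i + 1)
      else i :: divListB n (i + 1)
    else divListB n (i + 1)
  else []
termination_by (n + 1 - i).toNat
decreasing_by all_goals exact pvSqLoopMeasure h

def pvEvenP (d : Int) : Bool := decide (PySem.Int.mod d 2 = 0)
def pvOddP (d : Int) : Bool := decide (¬ PySem.Int.mod d 2 = 0)

theorem foldlA_counts (l : List Int) (o e : Int) :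
    l.foldl (fun s d => if PySem.Int.mod d 2 = 0 then (s.1, s.2 + 1) else (s.1 + 1, s.2)) (o, e)
      = (o + (l.countP pvOddP : Int), e + (l.countP pvEvenP : Int)) := by
  induction l generalizing o e with
  | nil => simp
  | cons d t ih =>
    simp only [List.foldl_cons, List.countP_cons, pvOddP, pvEvenP]
    by_cases hb : PySem.Int.mod d 2 = 0 <;>
      · simp only [hb, if_pos, if_neg, decide_true, decide_false, decide_not, not_false_iff,
          not_true, Bool.not_true, Bool.not_false, ite_true, ite_false, if_true, if_false, ih,
          Prod.mk.injEq, eq_self_iff_true, not_false_eq_true, decide_eq_true_eq]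
        push_cast
        constructor <;> ring

theorem countLoopB_counts (n : Int) : ∀ (k : Nat) (i o e : Int), (n + 1 - i).toNat = k →
    countLoopB n i o e
      = (o + ((divListB n i).countP pvOddP : Int), e + ((divListB n i).countP pvEvenP : Int)) := by
  intro k
  induction k with
  | zero =>
    intro i o e hk
    have hni : ¬ i * i ≤ n := fun h => absurd (pvSqLoopMeasure h) (by omega)
    rw [countLoopB, divListB]
    simp [hni]
  | succ k ih =>
    intro i o e hk
    rw [countLoopB, divListB]
    by_cases h : i * i ≤ n
    · have hk' : (n + 1 - (i + 1)).toNat = k := by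
        have := pvSqLoopMeasure h; omega
      by_cases hd : PySem.Int.mod n i = 0
      · by_cases hj : PySem.Int.floordiv n i = i
        · simp only [dif_pos h, if_pos hd, hj, ne_eq, not_true_eq_false, if_false, ite_false]
          rw [ih (i + 1) _ _ hk']
          simp only [List.countP_cons, pvOddP, pvEvenP]
          by_cases h1 : PySem.Int.mod i 2 = 0 <;>
            · simp only [h1, decide_true, decide_false, not_false_eq_true, not_true,
                decide_eq_true_eq, ite_true, ite_false, if_true, if_false, Prod.mk.injEq,
                not_false_iff, not_true_eq_false]
              push_cast
              constructor <;> ring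
        · simp only [dif_pos h, if_pos hd, ne_eq, hj, not_false_eq_true, if_true, ite_true]
          rw [ih (i + 1) _ _ hk']
          simp only [List.countP_cons, pvOddP, pvEvenP]
          by_cases h1 : PySem.Int.mod i 2 = 0 <;>
            by_cases h2 : PySem.Int.mod (PySem.Int.floordiv n i) 2 = 0 <;>
              · simp only [h1, h2, decide_true, decide_false, not_false_eq_true, not_true,
                  decide_eq_true_eq, ite_true, ite_false, if_true, if_false, Prod.mk.injEq,
                  not_false_iff, not_true_eq_false]
                push_cast
                constructor <;> ring
      · simp only [dif_pos h, if_neg hd]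
        exact ih (i + 1) o e hk'
    · simp [h]

-- literal membership characterisation of divListB
theorem mem_divListB (n : Int) : ∀ (k : Nat) (i x : Int), (n + 1 - i).toNat = k → 1 ≤ i →
    (x ∈ divListB n i ↔ ∃ m, i ≤ m ∧ m * m ≤ n ∧ PySem.Int.mod n m = 0 ∧
      (x = m ∨ (PySem.Int.floordiv n m ≠ m ∧ x = PySem.Int.floordiv n m))) := by
  intro k
  induction k with
  | zero =>
    intro i x hk hi
    have hni : ¬ i * i ≤ n := fun h => absurd (pvSqLoopMeasure h) (by omega)
    rw [divListB]
    simp only [hni, dif_neg, not_false_iff, List.not_mem_nil, false_iff]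
    rintro ⟨m, him, hm, -, -⟩
    have h1 : m ≤ m * m := le_mul_of_one_le_left (by omega) (by omega)
    omega
  | succ k ih =>
    intro i x hk hi
    rw [divListB]
    by_cases h : i * i ≤ n
    · have hk' : (n + 1 - (i + 1)).toNat = k := by have := pvSqLoopMeasure h; omega
      by_cases hd : PySem.Int.mod n i = 0
      · by_cases hj : PySem.Int.floordiv n i = i
        · simp only [dif_pos h, if_pos hd, ne_eq, hj, not_true_eq_false, if_false, ite_false,
            List.mem_cons, ih (i + 1) x hk' (by omega)]
          constructor
          · rintro (hx | ⟨m, h1, h2, h3, h4⟩)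
            · exact ⟨i, le_refl i, h, hd, Or.inl hx⟩
            · exact ⟨m, by omega, h2, h3, h4⟩
          · rintro ⟨m, h1, h2, h3, h4⟩
            rcases eq_or_lt_of_le h1 with rfl | h1'
            · rcases h4 with hx | ⟨hne, hx⟩
              · exact Or.inl hx
              · exact absurd hj hne
            · exact Or.inr ⟨m, by omega, h2, h3, h4⟩
        · simp only [dif_pos h, if_pos hd, ne_eq, hj, not_false_eq_true, if_true, ite_true,
            List.mem_cons, ih (i + 1) x hk' (by omega)]
          constructor
          · rintro (hx | hx | ⟨m, h1, h2, h3, h4⟩)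
            · exact ⟨i, le_refl i, h, hd, Or.inl hx⟩
            · exact ⟨i, le_refl i, h, hd, Or.inr ⟨hj, hx⟩⟩
            · exact ⟨m, by omega, h2, h3, h4⟩
          · rintro ⟨m, h1, h2, h3, h4⟩
            rcases eq_or_lt_of_le h1 with rfl | h1'
            · rcases h4 with hx | ⟨-, hx⟩
              · exact Or.inl hx
              · exact Or.inr (Or.inl hx)
            · exact Or.inr (Or.inr ⟨m, by omega, h2, h3, h4⟩)
      · simp only [dif_pos h, if_neg hd, ih (i + 1) x hk' (by omega)]
        constructor
        · rintro ⟨m, h1, h2, h3, h4⟩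
          exact ⟨m, by omega, h2, h3, h4⟩
        · rintro ⟨m, h1, h2, h3, h4⟩
          rcases eq_or_lt_of_le h1 with rfl | h1'
          · exact absurd h3 hd
          · exact ⟨m, by omega, h2, h3, h4⟩
    · simp only [h, dif_neg, not_false_iff, List.not_mem_nil, false_iff]
      rintro ⟨m, him, hm, -, -⟩
      have hmi : i * i ≤ m * m := mul_le_mul him him (by omega) (by omega)
      omega

theorem mem_get_divisors (n x : Int) :
    x ∈ get_divisors n ↔ 1 ≤ x ∧ x ≤ n ∧ PySem.Int.mod n x = 0 := by
  simp only [get_divisors, List.mem_filter, PySem.List.mem_pyRange_one, decide_eq_true_eq]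
  omega

theorem mem_divListB_one (n x : Int) :
    x ∈ divListB n 1 ↔ 1 ≤ x ∧ x ≤ n ∧ PySem.Int.mod n x = 0 := by
  rw [mem_divListB n (n + 1 - 1).toNat 1 x rfl (by omega)]
  constructor
  · rintro ⟨m, h1m, hmm, hmod, hx⟩
    have hdvd : m ∣ n := (PySem.Int.mod_eq_zero_iff_dvd n m).mp hmod
    have hmn : m ≤ n := le_trans (le_mul_of_one_le_left (by omega) h1m) hmm
    rcases hx with rfl | ⟨hne, rfl⟩
    · exact ⟨h1m, hmn, hmod⟩
    · have hfd : PySem.Int.floordiv n m = n / m :=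
        PySem.Int.floordiv_eq_ediv_of_pos (a := n) (by omega)
      rw [hfd]
      have hn : m * (n / m) = n := Int.mul_ediv_cancel' hdvd
      have hq1 : 1 ≤ n / m := by nlinarith
      refine ⟨hq1, by nlinarith, ?_⟩
      rw [PySem.Int.mod_eq_zero_iff_dvd]
      exact ⟨m, by linarith [mul_comm m (n / m)]⟩
  · rintro ⟨hx1, hxn, hmod⟩
    have hdvd : x ∣ n := (PySem.Int.mod_eq_zero_iff_dvd n x).mp hmod
    have hn : x * (n / x) = n := Int.mul_ediv_cancel' hdvd
    by_cases hxx : x * x ≤ n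
    · exact ⟨x, hx1, hxx, hmod, Or.inl rfl⟩
    · push_neg at hxx
      set q := n / x with hq
      have hq1 : 1 ≤ q := by nlinarith
      have hqx : q < x := by nlinarith
      have hqxn : q * x = n := by linarith [mul_comm x q]
      have hfd : PySem.Int.floordiv n q = n / q :=
        PySem.Int.floordiv_eq_ediv_of_pos (a := n) (by omega)
      have hnq : n / q = x := by rw [← hqxn, Int.mul_ediv_cancel_left x (by omega)]
      refine ⟨q, hq1, by nlinarith, ?_, Or.inr ⟨?_, ?_⟩⟩
      · rw [PySem.Int.mod_eq_zero_iff_dvd]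
        exact ⟨x, by linarith⟩
      · rw [hfd, hnq]; omega
      · rw [hfd, hnq]

theorem nodup_divListB (n : Int) : ∀ (k : Nat) (i : Int), (n + 1 - i).toNat = k → 1 ≤ i →
    (divListB n i).Nodup := by
  intro k
  induction k with
  | zero =>
    intro i hk hi
    have hni : ¬ i * i ≤ n := fun h => absurd (pvSqLoopMeasure h) (by omega)
    rw [divListB]; simp [hni]
  | succ k ih =>
    intro i hk hi
    rw [divListB]
    by_cases h : i * i ≤ n
    · have hk' : (n + 1 - (i + 1)).toNat = k := by have := pvSqLoopMeasure h; omega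
      have hrest := ih (i + 1) hk' (by omega)
      have hmemgt : ∀ x, x ∈ divListB n (i + 1) → i < x := by
        intro x hx
        rw [mem_divListB n k (i + 1) x hk' (by omega)] at hx
        obtain ⟨m, h1m, hmm, hmod, hxm⟩ := hx
        rcases hxm with rfl | ⟨hne, rfl⟩
        · omega
        · have hdvd : m ∣ n := (PySem.Int.mod_eq_zero_iff_dvd n m).mp hmod
          have hfdm : PySem.Int.floordiv n m = n / m :=
            PySem.Int.floordiv_eq_ediv_of_pos (a := n) (by omega)
          have hnm : m * (n / m) = n := Int.mul_ediv_cancel' hdvd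
          rw [hfdm]
          have hmq : m ≤ n / m := le_of_mul_le_mul_left (by rw [hnm]; exact hmm) (by omega)
          omega
      by_cases hd : PySem.Int.mod n i = 0
      · have hdvd : i ∣ n := (PySem.Int.mod_eq_zero_iff_dvd n i).mp hd
        have hfd : PySem.Int.floordiv n i = n / i :=
          PySem.Int.floordiv_eq_ediv_of_pos (a := n) (by omega)
        have hn : i * (n / i) = n := Int.mul_ediv_cancel' hdvd
        have hinotmem : i ∉ divListB n (i + 1) := fun hmem => by
          have := hmemgt i hmem; omega
        by_cases hj : PySem.Int.floordiv n i = i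
        · simp only [dif_pos h, if_pos hd, ne_eq, hj, not_true_eq_false, if_false, ite_false]
          exact List.nodup_cons.mpr ⟨hinotmem, hrest⟩
        · simp only [dif_pos h, if_pos hd, ne_eq, hj, not_false_eq_true, if_true, ite_true]
          rw [hfd] at hj ⊢
          have hile : i ≤ n / i := le_of_mul_le_mul_left (by rw [hn]; exact h) (by omega)
          have hij : i < n / i := lt_of_le_of_ne hile (Ne.symm hj)
          have hjj : n < (n / i) * (n / i) := by nlinarith
          have hjnotmem : n / i ∉ divListB n (i + 1) := by
            intro hmem
            rw [mem_divListB n k (i + 1) _ hk' (by omega)] at hmem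
            obtain ⟨m, h1m, hmm, hmod, hxm⟩ := hmem
            have hmdvd : m ∣ n := (PySem.Int.mod_eq_zero_iff_dvd n m).mp hmod
            have hmn : m * (n / m) = n := Int.mul_ediv_cancel' hmdvd
            have hfdm : PySem.Int.floordiv n m = n / m :=
              PySem.Int.floordiv_eq_ediv_of_pos (a := n) (by omega)
            rcases hxm with hxm | ⟨hne, hxm⟩
            · nlinarith
            · rw [hfdm] at hxm
              have h1 : m * (n / i) = n := by rw [← hxm] at hmn; exact hmn
              have hq1 : 1 ≤ n / i := by omega
              have hzero : (m - i) * (n / i) = 0 := by nlinarith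
              have : m = i := by
                rcases mul_eq_zero.mp hzero with h0 | h0
                · omega
                · omega
              omega
          refine List.nodup_cons.mpr ⟨?_, List.nodup_cons.mpr ⟨hjnotmem, hrest⟩⟩
          simp only [List.mem_cons]
          rintro (heq | hmem)
          · omega
          · exact hinotmem hmem
      · simp only [dif_pos h, if_neg hd]
        exact hrest
    · rw [divListB]; simp [h]

theorem nodup_get_divisors (n : Int) : (get_divisors n).Nodup :=
  List.Nodup.filter _ (PySem.List.nodup_pyRange_one 1 (n + 1))

theorem perm_divListB_get_divisors (n : Int) : (divListB n 1).Perm (get_divisors n) := by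
  rw [List.perm_ext_iff_of_nodup (nodup_divListB n (n + 1 - 1).toNat 1 rfl (by omega))
    (nodup_get_divisors n)]
  intro x
  rw [mem_divListB_one, mem_get_divisors]

-- ===== VERDICT (by name: the statement is the Claim_ definition above) =====
theorem count_odd_and_even_divisors_spec : Claim_equal_count_odd_and_even_divisors := by
  intro n _
  unfold Spec_count_odd_and_even_divisors count_odd_and_even_divisors count_odd_and_even_divisors_alt
  rw [foldlA_counts, countLoopB_counts n (n + 1 - 1).toNat 1 0 0 rfl,
    (perm_divListB_get_divisors n).countP_eq pvOddP,
    (perm_divListB_get_divisors n).countP_eq pvEvenP]
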